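-- pv_equiv track=rewrite | github.com/TheAlgorithms/Python | maths/abs.py | mutlak_min
-- ===== SOURCE A (Python) =====
-- def mutlak_deger(sayi: float) -> float:
--     """
--     Bir sayının mutlak değerini bulun.
--
--     >>> mutlak_deger(-5.1)
--     5.1
--     >>> mutlak_deger(-5) == mutlak_deger(5)
--     True
--     >>> mutlak_deger(0)
--     0
--     """
--     return -sayi if sayi < 0 else sayi
--
-- def mutlak_min(x: list[int]) -> int:
--     """
--     >>> mutlak_min([0,5,1,11])
--     0
--     >>> mutlak_min([3,-10,-2])
--     -2
--     >>> mutlak_min([])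
--     Traceback (most recent call last):
--         ...
--     ValueError: mutlak_min() argümanı boş bir dizidir
--     """
--     if len(x) == 0:
--         raise ValueError("mutlak_min() argümanı boş bir dizidir")
--     j = x[0]
--     for i in x:
--         if mutlak_deger(i) < mutlak_deger(j):
--             j = i
--     return j
-- ===== SOURCE B (Python) =====
-- def mutlak_deger(sayi: float) -> float:
--     return -sayi if sayi < 0 else sayi
--
--
-- def mutlak_min(x: list[int]) -> int:
--     if len(x) == 0:
--         raise ValueError("mutlak_min() argümanı boş bir dizidir")
--     m = min(mutlak_deger(i) for i in x)
--     for i in x: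
--         if mutlak_deger(i) == m:
--             return i
-- ===== Notes on version B (the rewrite author's own statement) =====
-- stated objective: alternative
-- what changed: replaces the running-minimum fold (strict-< update) with two passes: first compute the minimum absolute value, then return the first element attaining it
import Mathlib
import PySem

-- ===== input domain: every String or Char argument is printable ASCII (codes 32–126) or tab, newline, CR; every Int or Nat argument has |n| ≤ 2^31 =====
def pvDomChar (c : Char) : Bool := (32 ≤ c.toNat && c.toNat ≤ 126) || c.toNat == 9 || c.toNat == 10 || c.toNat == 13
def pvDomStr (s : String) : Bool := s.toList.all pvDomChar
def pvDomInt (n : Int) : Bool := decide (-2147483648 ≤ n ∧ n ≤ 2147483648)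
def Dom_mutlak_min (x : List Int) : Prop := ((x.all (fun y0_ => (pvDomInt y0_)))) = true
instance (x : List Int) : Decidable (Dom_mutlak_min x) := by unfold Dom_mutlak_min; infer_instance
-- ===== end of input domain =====

-- B replaces A's running-minimum loop by two passes (min of absolute values, then first element
-- attaining it); same cost, genuinely different structure (objective: alternative).


-- ===== PORT A =====
def mutlakDeger (sayi : Int) : Int := if sayi < 0 then -sayi else sayi

-- j = x[0]; for i in x: if |i| < |j|: j = i; return j   ([] raises ValueError → excluded by Pre_)
def mutlak_min (x : List Int) : Int :=
  match x with
  | [] => 0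
  | j0 :: _ => x.foldl (fun j i => if mutlakDeger i < mutlakDeger j then i else j) j0

-- ===== PORT B =====
-- m = min(mutlak_deger(i) for i in x); return the first i with mutlak_deger(i) == m
def mutlak_min_alt (x : List Int) : Int :=
  match x with
  | [] => 0
  | _ :: _ =>
    let m := (PySem.List.min? (x.map mutlakDeger) (fun y => y)).getD 0
    (x.find? (fun i => mutlakDeger i == m)).getD 0

-- ===== PRECONDITION & SPEC =====
-- Pre_ excludes only the empty list, on which A raises ValueError.
def Pre_mutlak_min (x : List Int) : Prop := x ≠ []
instance (x : List Int) : Decidable (Pre_mutlak_min x) := by unfold Pre_mutlak_min; infer_instance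
def pvWitness_mutlak_min : List Int := [3, -10, -2]

def Spec_mutlak_min (x : List Int) (out : Int) : Prop := out = mutlak_min_alt x
instance (x : List Int) (out : Int) : Decidable (Spec_mutlak_min x out) := by unfold Spec_mutlak_min; infer_instance

-- ===== CLAIM (what is proved, stated in full; the proofs are below) =====
def Claim_equal_mutlak_min : Prop := ∀ (x : List Int), Dom_mutlak_min x → Pre_mutlak_min x → Spec_mutlak_min x (mutlak_min x)

-- ===== LEMMAS AND PROOFS =====

lemma foldl_min_le (l : List Int) (a : Int) : l.foldl min a ≤ a := by
  induction l generalizing a with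
  | nil => simp
  | cons b l ih =>
      simpa [List.foldl] using le_trans (ih (min a b)) (min_le_left a b)

-- A's fold starting at j over t returns the first element of (j :: t) attaining the minimum
-- absolute value of (j :: t).
lemma foldG (t : List Int) (j : Int) :
    t.foldl (fun j i => if mutlakDeger i < mutlakDeger j then i else j) j
      = ((j :: t).find? (fun i =>
          mutlakDeger i == (t.map mutlakDeger).foldl min (mutlakDeger j))).getD 0 := by
  induction t generalizing j with
  | nil => simp [List.find?]
  | cons i t' ih =>
      have hfold : ((i :: t').map mutlakDeger).foldl min (mutlakDeger j)
          = (t'.map mutlakDeger).foldl min (min (mutlakDeger j) (mutlakDeger i)) := by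
        simp
      have hle : (t'.map mutlakDeger).foldl min (min (mutlakDeger j) (mutlakDeger i))
          ≤ min (mutlakDeger j) (mutlakDeger i) := foldl_min_le _ _
      by_cases h : mutlakDeger i < mutlakDeger j
      · -- j is beaten by i; j can never be the first attainer
        have hmin : min (mutlakDeger j) (mutlakDeger i) = mutlakDeger i := by omega
        have hle' : (t'.map mutlakDeger).foldl min (mutlakDeger i) ≤ mutlakDeger i := by
          have := hle; rw [hmin] at this; omega
        have hjne : (mutlakDeger j ==
            (t'.map mutlakDeger).foldl min (mutlakDeger i)) = false := by
          simp only [beq_eq_false_iff_ne, ne_eq]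
          omega
        rw [List.foldl_cons, if_pos h, ih i, hfold, hmin]
        simp [List.find?, hjne]
      · -- j survives; either j attains the minimum (both heads hit) or both skip j and i
        have hji : mutlakDeger j ≤ mutlakDeger i := by omega
        have hmin : min (mutlakDeger j) (mutlakDeger i) = mutlakDeger j := by omega
        rw [List.foldl_cons, if_neg h, ih j, hfold, hmin]
        by_cases hj : mutlakDeger j = (t'.map mutlakDeger).foldl min (mutlakDeger j)
        · simp [List.find?, ← hj]
        · have hlt : (t'.map mutlakDeger).foldl min (mutlakDeger j) < mutlakDeger j := by
            have := foldl_min_le (t'.map mutlakDeger) (mutlakDeger j)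
            omega
          have hjne : (mutlakDeger j == (t'.map mutlakDeger).foldl min (mutlakDeger j)) = false := by
            simp only [beq_eq_false_iff_ne, ne_eq]; omega
          have hine : (mutlakDeger i == (t'.map mutlakDeger).foldl min (mutlakDeger j)) = false := by
            simp only [beq_eq_false_iff_ne, ne_eq]; omega
          simp [List.find?, hjne, hine]

-- ===== VERDICT (by name: the statement is the Claim_ definition above) =====
theorem mutlak_min_spec : Claim_equal_mutlak_min := by
  intro x _ hpre
  unfold Spec_mutlak_min
  match x with
  | [] => exact absurd rfl hpre
  | x0 :: t =>
      show (x0 :: t).foldl (fun j i => if mutlakDeger i < mutlakDeger j then i else j) x0 = _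
      rw [List.foldl_cons]
      have hstep : (if mutlakDeger x0 < mutlakDeger x0 then x0 else x0) = x0 := by simp
      rw [hstep, foldG t x0]
      unfold mutlak_min_alt
      rw [List.map_cons, PySem.List.min?_id_cons]
      rfl
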